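-- pv_equiv track=rewrite | github.com/elifBalci/connect4-ai-player | evaluation.py | check_diagonal
-- ===== SOURCE A (Python) =====
-- def check_diagonal(board, player):
--     max_col = len(board[0])
--     max_row = len(board)
--     column = [[] for _ in range(max_col)]
--     row = [[] for _ in range(max_row)]
--     diagonal_1st_dir = [[] for _ in range(max_row + max_col - 1)]
--     diagonal_2nd_dir = [[] for _ in range(len(diagonal_1st_dir))]
--     min_diag_cons = -max_row + 1
--     for i in range(max_col):
--         for j in range(max_row):
--             column[i].append(board[j][i])
--             row[j].append(board[j][i])
--             diagonal_1st_dir[i + j].append(board[j][i])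
--             diagonal_2nd_dir[i - j - min_diag_cons].append(board[j][i])
--     p1 = process_diagonal(diagonal_1st_dir, player)
--     p2 = process_diagonal(diagonal_2nd_dir, player)
--     list_diagonals = p1[0] + p2[0]
--     return list_diagonals, p1[1], p2[1]
--
-- def process_diagonal(diagonal_list, player):
--     max_consecutive = 0
--     max_for_element = 0
--     consecutive = 0
--     list_of_consecutive = []
--     for list_element in diagonal_list:
--         for element in list_element:
--             for e in element:
--                 if e == player:
--                     consecutive = consecutive + 1
--                     max_consecutive = max(max_consecutive, consecutive)
--                 else:
--                     consecutive = 0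
--         consecutive = 0
--         if max_consecutive != 0:
--             list_of_consecutive.append(max_consecutive)
--         max_for_element = max(max_consecutive, max_for_element)
--         max_consecutive = 0
--     if list_of_consecutive:
--         max_for_element = max(list_of_consecutive)
--     return list_of_consecutive, max_for_element
-- ===== SOURCE B (Python) =====
-- def check_diagonal(board, player):
--     # Online dynamic-programming sweep: one pass over the cells keeps per-diagonal
--     # current-run and best-run state arrays for both families; no diagonal cell
--     # lists are materialized and no second scanning pass over diagonals happens.
--     R = len(board)
--     C = len(board[0])
--     n = C + R - 1
--     run1 = [0] * n
--     best1 = [0] * n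
--     run2 = [0] * n
--     best2 = [0] * n
--     for i in range(C):
--         for j in range(R):
--             k1 = i + j
--             k2 = i - j + R - 1
--             for e in board[j][i]:
--                 if e == player:
--                     run1[k1] += 1
--                     if run1[k1] > best1[k1]:
--                         best1[k1] = run1[k1]
--                     run2[k2] += 1
--                     if run2[k2] > best2[k2]:
--                         best2[k2] = run2[k2]
--                 else:
--                     run1[k1] = 0
--                     run2[k2] = 0
--     l1 = [b for b in best1 if b > 0]
--     l2 = [b for b in best2 if b > 0]
--     return l1 + l2, max(l1, default=0), max(l2, default=0)
-- ===== Notes on version B (the rewrite author's own statement) =====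
-- stated objective: alternative
-- what changed: Replaces A's materialize-then-scan (filling per-diagonal bucket lists plus dead row/column lists, then running a separate run-length scan over each bucket) by an online dynamic-programming sweep: a single pass over the cells maintains per-diagonal current-run and best-run state arrays for both diagonal families simultaneously, so no diagonal cell list is ever built and there is no second pass.
import Mathlib
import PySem

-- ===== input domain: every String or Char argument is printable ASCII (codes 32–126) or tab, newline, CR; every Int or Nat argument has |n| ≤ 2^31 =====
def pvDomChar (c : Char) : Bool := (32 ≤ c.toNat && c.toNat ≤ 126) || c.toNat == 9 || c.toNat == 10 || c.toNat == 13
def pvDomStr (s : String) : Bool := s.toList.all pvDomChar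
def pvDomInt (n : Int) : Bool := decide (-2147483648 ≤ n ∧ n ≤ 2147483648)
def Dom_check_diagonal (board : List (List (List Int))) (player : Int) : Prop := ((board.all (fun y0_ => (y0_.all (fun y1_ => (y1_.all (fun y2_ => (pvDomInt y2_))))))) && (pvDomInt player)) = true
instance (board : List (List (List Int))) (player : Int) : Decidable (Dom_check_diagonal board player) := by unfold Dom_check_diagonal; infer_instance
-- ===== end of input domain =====

-- B replaces A's materialize-buckets-then-scan by a single online DP sweep with per-diagonal
-- run/best state arrays (alternative decomposition, similar cost).

-- ===== PORT A =====
-- 'for e in element' body: state (max_consecutive, consecutive)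
def pvStepA (player : Int) (s : Int × Int) (e : Int) : Int × Int :=
  if e = player then (max s.1 (s.2 + 1), s.2 + 1) else (s.1, 0)

-- process_diagonal: state (max_consecutive, max_for_element, consecutive, list_of_consecutive)
def process_diagonal (diagonal_list : List (List (List Int))) (player : Int) : List Int × Int :=
  let st := diagonal_list.foldl
    (fun (st : Int × Int × Int × List Int) list_element =>
      let inner := list_element.foldl (fun s element => element.foldl (pvStepA player) s) (st.1, st.2.2.1)
      let lst := if inner.1 ≠ 0 then st.2.2.2 ++ [inner.1] else st.2.2.2
      (0, max inner.1 st.2.1, 0, lst))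
    (0, 0, 0, [])
  let lst := st.2.2.2
  let mfe := if lst ≠ [] then (PySem.List.max? lst (fun y => y)).getD 0 else st.2.1
  (lst, mfe)

-- diagonal[k].append(cell)
def pvPush (l : List (List (List Int))) (k : Nat) (v : List Int) : List (List (List Int)) :=
  l.set k (l.getD k [] ++ [v])

def check_diagonal (board : List (List (List Int))) (player : Int) : List Int × Int × Int :=
  let max_col := ((PySem.List.pyGet? board 0).getD []).length   -- len(board[0]); board = [] raises, excluded by Pre_
  let max_row := board.length
  -- A also builds `column` and `row`, which are never read; that dead code is omitted here
  let init : List (List (List Int)) := List.replicate (max_row + max_col - 1) []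
  let st := (List.range max_col).foldl (fun st2 (i : Nat) =>
      (List.range max_row).foldl (fun (st3 : List (List (List Int)) × List (List (List Int))) (j : Nat) =>
        -- board[j][i]; out-of-range i raises, excluded by Pre_
        let cell := (PySem.List.pyGet? ((PySem.List.pyGet? board (j : Int)).getD []) (i : Int)).getD []
        -- i - j - min_diag_cons = i - j + max_row - 1 = i + (max_row - 1 - j), exact in Nat since j < max_row
        (pvPush st3.1 (i + j) cell, pvPush st3.2 (i + (max_row - 1 - j)) cell)) st2)
    (init, init)
  let p1 := process_diagonal st.1 player
  let p2 := process_diagonal st.2 player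
  (p1.1 ++ p2.1, p1.2, p2.2)

-- ===== PORT B =====
-- the if e == player / else body, acting on one family's (run, best) arrays at index k
def pvUpd (player : Int) (k : Nat) (rb : List Int × List Int) (e : Int) : List Int × List Int :=
  if e = player then
    let r := rb.1.getD k 0 + 1
    let run' := rb.1.set k r
    let best' := if r > rb.2.getD k 0 then rb.2.set k r else rb.2
    (run', best')
  else (rb.1.set k 0, rb.2)

def check_diagonal_alt (board : List (List (List Int))) (player : Int) : List Int × Int × Int :=
  let R := board.length
  let C := ((PySem.List.pyGet? board 0).getD []).length
  let n := C + R - 1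
  let init : List Int := List.replicate n 0
  let st := (List.range C).foldl (fun st (i : Nat) =>
      (List.range R).foldl (fun (st : (List Int × List Int) × (List Int × List Int)) (j : Nat) =>
        let cell := (PySem.List.pyGet? ((PySem.List.pyGet? board (j : Int)).getD []) (i : Int)).getD []
        -- k2 = i - j + R - 1 = i + (R - 1 - j), exact in Nat since j < R
        cell.foldl (fun st e =>
          (pvUpd player (i + j) st.1 e, pvUpd player (i + (R - 1 - j)) st.2 e)) st) st)
    ((init, init), (init, init))
  let l1 := st.1.2.filter (fun b => decide (0 < b))
  let l2 := st.2.2.filter (fun b => decide (0 < b))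
  (l1 ++ l2, (PySem.List.max? l1 (fun y => y)).getD 0, (PySem.List.max? l2 (fun y => y)).getD 0)

-- ===== PRECONDITION & SPEC =====
-- Pre_ excludes exactly the inputs where A raises: board = [] (IndexError on board[0]) and
-- boards where some row is shorter than row 0 (IndexError on board[j][i]).
def Pre_check_diagonal (board : List (List (List Int))) (_player : Int) : Prop :=
  board ≠ [] ∧ ∀ r ∈ board, (board.headD []).length ≤ r.length
instance (board : List (List (List Int))) (player : Int) : Decidable (Pre_check_diagonal board player) := by unfold Pre_check_diagonal; infer_instance

def pvWitness_check_diagonal : List (List (List Int)) × Int := ([[[1], [0]], [[0, 1], [1]]], 1)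

def Spec_check_diagonal (board : List (List (List Int))) (player : Int) (out : List Int × Int × Int) : Prop := out = check_diagonal_alt board player
instance (board : List (List (List Int))) (player : Int) (out : List Int × Int × Int) : Decidable (Spec_check_diagonal board player out) := by unfold Spec_check_diagonal; infer_instance

-- ===== CLAIM (what is proved, stated in full; the proofs are below) =====
def Claim_equal_check_diagonal : Prop := ∀ (board : List (List (List Int))) (player : Int), Dom_check_diagonal board player → Pre_check_diagonal board player → Spec_check_diagonal board player (check_diagonal board player)

-- ===== LEMMAS AND PROOFS =====

-- generic loop-shape helpers ----------------------------------------------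

theorem pv_foldl_prod {a b c : Type} (f : a → c → a) (g : b → c → b) (l : List c) (p : a × b) :
    l.foldl (fun st x => (f st.1 x, g st.2 x)) p = (l.foldl f p.1, l.foldl g p.2) := by
  induction l generalizing p with
  | nil => rfl
  | cons x t ih => simp [List.foldl_cons, ih]

theorem pv_foldl_flatMap {s a b : Type} (l : List a) (f : a → List b) (g : s → b → s) (init : s) :
    (l.flatMap f).foldl g init = l.foldl (fun st x => (f x).foldl g st) init := by
  induction l generalizing init with
  | nil => rfl
  | cons x t ih => simp [List.foldl_append, ih]

-- bucket construction (A side) ---------------------------------------------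

def pvPairs (C R : Nat) : List (Nat × Nat) :=
  (List.range C).flatMap (fun i => (List.range R).map (fun j => (i, j)))

def pvCell (board : List (List (List Int))) (j i : Nat) : List Int :=
  (PySem.List.pyGet? ((PySem.List.pyGet? board (j : Int)).getD []) (i : Int)).getD []

def pvCellsA (board : List (List (List Int))) (key : Nat × Nat → Nat) (C R k : Nat) :
    List (List Int) :=
  ((pvPairs C R).filter (fun p => key p == k)).map (fun p => pvCell board p.2 p.1)

theorem pvPush_length (l : List (List (List Int))) (kp : Nat) (v : List Int) :
    (pvPush l kp v).length = l.length := by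
  simp [pvPush]

theorem pvPush_getD (l : List (List (List Int))) (kp k : Nat) (v : List Int) (hk : k < l.length) :
    (pvPush l kp v).getD k [] = if kp = k then l.getD k [] ++ [v] else l.getD k [] := by
  simp only [pvPush, List.getD_eq_getElem?_getD, List.getElem?_set]
  by_cases h : kp = k
  · subst h; simp [hk]
  · simp [h]

theorem pv_buckets_len (key : Nat × Nat → Nat) (val : Nat × Nat → List Int)
    (ps : List (Nat × Nat)) : ∀ (init : List (List (List Int))),
    (ps.foldl (fun s p => pvPush s (key p) (val p)) init).length = init.length := by
  induction ps with
  | nil => intro init; rfl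
  | cons p t ih => intro init; rw [List.foldl_cons, ih, pvPush_length]

theorem pv_buckets_getD (key : Nat × Nat → Nat) (val : Nat × Nat → List Int)
    (ps : List (Nat × Nat)) : ∀ (init : List (List (List Int))) (k : Nat), k < init.length →
    ((ps.foldl (fun s p => pvPush s (key p) (val p)) init).getD k [])
      = init.getD k [] ++ (ps.filter (fun p => key p == k)).map val := by
  induction ps with
  | nil => intro init k hk; simp
  | cons p t ih =>
    intro init k hk
    rw [List.foldl_cons, ih _ k (by rw [pvPush_length]; exact hk),
        pvPush_getD _ _ _ _ hk, List.filter_cons]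
    by_cases h : key p = k
    · simp [h, List.append_assoc]
    · simp [h]

-- the nested i/j loop, as a fold over the flat pair list, one bucket list per family
theorem pv_buckets_eq (board : List (List (List Int))) (key : Nat × Nat → Nat)
    (C R n : Nat) :
    (pvPairs C R).foldl (fun s p => pvPush s (key p) (pvCell board p.2 p.1))
        (List.replicate n ([] : List (List Int)))
      = (List.range n).map (fun k => pvCellsA board key C R k) := by
  apply List.ext_getElem
  · rw [pv_buckets_len]; simp
  · intro k h1 h2
    have hk : k < n := by
      rw [pv_buckets_len] at h1; simpa using h1
    have hgd := pv_buckets_getD key (fun p => pvCell board p.2 p.1) (pvPairs C R)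
      (List.replicate n ([] : List (List Int))) k (by simpa using hk)
    have hrep : (List.replicate n ([] : List (List Int))).getD k [] = [] := by
      simp [List.getD_eq_getElem?_getD, hk]
    rw [hrep, List.nil_append] at hgd
    have hget : (((pvPairs C R).foldl (fun s p => pvPush s (key p) (pvCell board p.2 p.1))
        (List.replicate n ([] : List (List Int))))).getD k [] = pvCellsA board key C R k := hgd
    rw [List.getD_eq_getElem?_getD, List.getElem?_eq_getElem h1] at hget
    simpa [pvCellsA] using hget

-- run-length machinery ----------------------------------------------------

-- scalar step in state order (best, cur), as in B's python body
def pvStepB (player : Int) (s : Int × Int) (e : Int) : Int × Int :=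
  if e = player then
    (if s.2 + 1 > s.1 then s.2 + 1 else s.1, s.2 + 1)
  else (s.1, 0)

theorem pvStep_eq (player : Int) : pvStepB player = pvStepA player := by
  funext s e
  simp only [pvStepA, pvStepB]
  split_ifs with he h
  · simp [Prod.ext_iff]; omega
  · simp [Prod.ext_iff]; omega
  · rfl

def pvM (player : Int) (b : List (List Int)) : Int :=
  (b.flatten.foldl (pvStepA player) (0, 0)).1

theorem pv_stepA_fst_le (player : Int) (l : List Int) :
    ∀ s : Int × Int, s.1 ≤ (l.foldl (pvStepA player) s).1 := by
  induction l with
  | nil => intro s; simp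
  | cons e t ih =>
    intro s
    rw [List.foldl_cons]
    refine le_trans ?_ (ih (pvStepA player s e))
    simp only [pvStepA]
    split_ifs <;> simp

theorem pvM_nonneg (player : Int) (b : List (List Int)) : 0 ≤ pvM player b :=
  pv_stepA_fst_le player b.flatten (0, 0)

theorem pv_allzero_max (ms : List Int) (h : ∀ m ∈ ms, m = 0) :
    ms.foldl (fun a m => max m a) 0 = 0 := by
  induction ms with
  | nil => rfl
  | cons x t ih =>
    rw [List.foldl_cons, h x (by simp)]
    simpa using ih (fun m hm => h m (by simp [hm]))

theorem pv_process_fold (player : Int) (L : List (List (List Int))) :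
    ∀ (mfe : Int) (lst : List Int),
    L.foldl
      (fun (st : Int × Int × Int × List Int) list_element =>
        let inner := list_element.foldl (fun s element => element.foldl (pvStepA player) s)
          (st.1, st.2.2.1)
        let lst := if inner.1 ≠ 0 then st.2.2.2 ++ [inner.1] else st.2.2.2
        (0, max inner.1 st.2.1, 0, lst))
      (0, mfe, 0, lst)
      = (0, (L.map (pvM player)).foldl (fun a m => max m a) mfe, 0,
          lst ++ (L.map (pvM player)).filter (fun m => !(m == 0))) := by
  induction L with
  | nil => intro mfe lst; simp
  | cons b t ih =>
    intro mfe lst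
    rw [List.foldl_cons]
    have hinner : b.foldl (fun s element => element.foldl (pvStepA player) s)
        ((0 : Int), (0 : Int)) = b.flatten.foldl (pvStepA player) (0, 0) := by
      simp [List.foldl_flatten]
    simp only
    rw [hinner, ih]
    by_cases h : (b.flatten.foldl (pvStepA player) ((0 : Int), (0 : Int))).1 = 0 <;>
      simp [h, pvM, List.append_assoc]

theorem pv_process_eq (player : Int) (L : List (List (List Int))) :
    process_diagonal L player =
      (let lst := (L.map (pvM player)).filter (fun m => !(m == 0))
       (lst, if lst ≠ [] then (PySem.List.max? lst (fun y => y)).getD 0 else 0)) := by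
  simp only [process_diagonal, pv_process_fold]
  by_cases h : (L.map (pvM player)).filter (fun m => !(m == 0)) = []
  · have hz : ∀ m ∈ L.map (pvM player), m = 0 := by
      intro m hm
      have := List.filter_eq_nil_iff.mp h m hm
      simpa using this
    simp [h, pv_allzero_max _ hz]
  · simp [h]

-- B-side sweep machinery ---------------------------------------------------

theorem pvUpd_len (player : Int) (kp : Nat) (rb : List Int × List Int) (e : Int) :
    (pvUpd player kp rb e).1.length = rb.1.length
      ∧ (pvUpd player kp rb e).2.length = rb.2.length := by
  simp only [pvUpd]
  split_ifs <;> simp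

theorem pvUpd_getD (player : Int) (kp : Nat) (rb : List Int × List Int) (e : Int) (k : Nat)
    (h1 : kp < rb.1.length) (h2 : kp < rb.2.length) :
    ((pvUpd player kp rb e).2.getD k 0, (pvUpd player kp rb e).1.getD k 0)
      = if kp = k then pvStepB player (rb.2.getD k 0, rb.1.getD k 0) e
        else (rb.2.getD k 0, rb.1.getD k 0) := by
  by_cases hk : kp = k
  · subst hk
    rw [if_pos rfl]
    simp only [pvUpd, pvStepB]
    split_ifs with he hgt <;>
      simp [List.getD_eq_getElem?_getD, h1, h2]
  · rw [if_neg hk]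
    simp only [pvUpd]
    split_ifs <;>
      simp [List.getD_eq_getElem?_getD, hk]

theorem pv_cellfold (player : Int) (kp : Nat) (cell : List Int) :
    ∀ rb : List Int × List Int, kp < rb.1.length → kp < rb.2.length →
    ((cell.foldl (pvUpd player kp) rb).1.length = rb.1.length
      ∧ (cell.foldl (pvUpd player kp) rb).2.length = rb.2.length)
    ∧ ∀ k, ((cell.foldl (pvUpd player kp) rb).2.getD k 0,
            (cell.foldl (pvUpd player kp) rb).1.getD k 0)
        = if kp = k then cell.foldl (pvStepB player) (rb.2.getD k 0, rb.1.getD k 0)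
          else (rb.2.getD k 0, rb.1.getD k 0) := by
  induction cell with
  | nil =>
    intro rb _ _
    refine ⟨⟨rfl, rfl⟩, fun k => ?_⟩
    by_cases h : kp = k <;> simp [h]
  | cons e t ih =>
    intro rb h1 h2
    rw [List.foldl_cons]
    have hlen := pvUpd_len player kp rb e
    have ihh := ih (pvUpd player kp rb e) (by omega) (by omega)
    refine ⟨⟨by rw [ihh.1.1, hlen.1], by rw [ihh.1.2, hlen.2]⟩, fun k => ?_⟩
    have hupd := pvUpd_getD player kp rb e k h1 h2
    rw [ihh.2 k, hupd]
    by_cases h : kp = k <;> simp [h]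

theorem pv_sweep (player : Int) (key : Nat × Nat → Nat) (val : Nat × Nat → List Int)
    (ps : List (Nat × Nat)) :
    ∀ S : List Int × List Int, (∀ p ∈ ps, key p < S.1.length ∧ key p < S.2.length) →
    (((ps.foldl (fun S p => (val p).foldl (pvUpd player (key p)) S) S).1.length = S.1.length
      ∧ (ps.foldl (fun S p => (val p).foldl (pvUpd player (key p)) S) S).2.length = S.2.length))
    ∧ ∀ k, ((ps.foldl (fun S p => (val p).foldl (pvUpd player (key p)) S) S).2.getD k 0,
            (ps.foldl (fun S p => (val p).foldl (pvUpd player (key p)) S) S).1.getD k 0)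
        = ((ps.filter (fun p => key p == k)).map val).flatten.foldl (pvStepB player)
            (S.2.getD k 0, S.1.getD k 0) := by
  induction ps with
  | nil =>
    intro S _
    exact ⟨⟨rfl, rfl⟩, fun k => by simp⟩
  | cons p t ih =>
    intro S hkey
    rw [List.foldl_cons]
    have hp := hkey p (by simp)
    have hc := pv_cellfold player (key p) (val p) S hp.1 hp.2
    have iht := ih ((val p).foldl (pvUpd player (key p)) S)
      (fun q hq => by rw [hc.1.1, hc.1.2]; exact hkey q (by simp [hq]))
    refine ⟨⟨by rw [iht.1.1, hc.1.1], by rw [iht.1.2, hc.1.2]⟩, fun k => ?_⟩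
    rw [iht.2 k, hc.2 k, List.filter_cons]
    by_cases h : key p = k
    · rw [if_pos h]
      simp only [h, beq_self_eq_true, if_pos]
      rw [List.map_cons, List.flatten_cons, List.foldl_append]
    · rw [if_neg h]
      simp [h]

theorem pv_best_eq (board : List (List (List Int))) (player : Int)
    (key : Nat × Nat → Nat) (C R n : Nat)
    (hkey : ∀ p ∈ pvPairs C R, key p < n) :
    ((pvPairs C R).foldl (fun S p => (pvCell board p.2 p.1).foldl (pvUpd player (key p)) S)
        (List.replicate n (0 : Int), List.replicate n (0 : Int))).2
      = (List.range n).map (fun k => pvM player (pvCellsA board key C R k)) := by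
  have hs := pv_sweep player key (fun p => pvCell board p.2 p.1) (pvPairs C R)
    (List.replicate n (0 : Int), List.replicate n (0 : Int))
    (fun p hp => ⟨by simpa using hkey p hp, by simpa using hkey p hp⟩)
  apply List.ext_getElem
  · rw [hs.1.2]; simp
  · intro k h1 h2
    have hk : k < n := by rw [hs.1.2] at h1; simpa using h1
    have hrep : (List.replicate n (0 : Int)).getD k 0 = 0 := by
      simp [List.getD_eq_getElem?_getD, hk]
    have := congrArg Prod.fst (hs.2 k)
    simp only [hrep] at this
    rw [List.getD_eq_getElem?_getD, List.getElem?_eq_getElem h1] at this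
    simp only [Option.getD_some] at this
    rw [this]
    simp only [List.getElem_map, List.getElem_range]
    rw [pvM, ← pvStep_eq]
    rfl

-- predicate bridge and max bridge ------------------------------------------

theorem pv_filter_pred (L : List (List (List Int))) (player : Int) :
    ((L.map (pvM player)).filter (fun m => !(m == 0)))
      = ((L.map (pvM player)).filter (fun b => decide (0 < b))) := by
  apply List.filter_congr
  intro m hm
  rcases List.mem_map.mp hm with ⟨b, _, hb⟩
  have h0 : 0 ≤ m := hb ▸ pvM_nonneg player b
  by_cases h : m = 0
  · simp [h]
  · have h1 : 0 < m := lt_of_le_of_ne h0 (Ne.symm h)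
    simp [h, h1]

theorem pv_max_bridge (l : List Int) :
    (if l ≠ [] then (PySem.List.max? l (fun y => y)).getD 0 else 0)
      = (PySem.List.max? l (fun y => y)).getD 0 := by
  by_cases h : l = []
  · subst h; simp [PySem.List.max?]
  · rw [if_pos h]

-- ===== MAIN PROOF =====

theorem pv_keys1 (C R : Nat) : ∀ p ∈ pvPairs C R, p.1 + p.2 < C + R - 1 := by
  intro p hp
  simp only [pvPairs, List.mem_flatMap, List.mem_map, List.mem_range] at hp
  rcases hp with ⟨i, hi, j, hj, rfl⟩
  omega

theorem pv_keys2 (C R : Nat) : ∀ p ∈ pvPairs C R, p.1 + (R - 1 - p.2) < C + R - 1 := by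
  intro p hp
  simp only [pvPairs, List.mem_flatMap, List.mem_map, List.mem_range] at hp
  rcases hp with ⟨i, hi, j, hj, rfl⟩
  omega

theorem pv_main : ∀ (board : List (List (List Int))) (player : Int),
    check_diagonal board player = check_diagonal_alt board player := by
  intro board player
  simp only [check_diagonal, check_diagonal_alt]
  set R := board.length with hR
  set C := ((PySem.List.pyGet? board 0).getD []).length with hC
  -- A's nested loop as a pair of bucket folds over the flat pair list
  have hnestA : (List.range C).foldl (fun st2 (i : Nat) =>
      (List.range R).foldl (fun (st3 : List (List (List Int)) × List (List (List Int))) (j : Nat) =>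
        let cell := (PySem.List.pyGet? ((PySem.List.pyGet? board (j : Int)).getD []) (i : Int)).getD []
        (pvPush st3.1 (i + j) cell, pvPush st3.2 (i + (R - 1 - j)) cell)) st2)
      (List.replicate (R + C - 1) [], List.replicate (R + C - 1) [])
      = ((List.range (C + R - 1)).map (fun k => pvCellsA board (fun p => p.1 + p.2) C R k),
         (List.range (C + R - 1)).map (fun k => pvCellsA board (fun p => p.1 + (R - 1 - p.2)) C R k)) := by
    have h1 : (List.range C).foldl (fun st2 (i : Nat) =>
        (List.range R).foldl (fun (st3 : List (List (List Int)) × List (List (List Int))) (j : Nat) =>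
          let cell := (PySem.List.pyGet? ((PySem.List.pyGet? board (j : Int)).getD []) (i : Int)).getD []
          (pvPush st3.1 (i + j) cell, pvPush st3.2 (i + (R - 1 - j)) cell)) st2)
        (List.replicate (R + C - 1) [], List.replicate (R + C - 1) [])
        = (pvPairs C R).foldl (fun st3 (p : Nat × Nat) =>
            (pvPush st3.1 (p.1 + p.2) (pvCell board p.2 p.1),
             pvPush st3.2 (p.1 + (R - 1 - p.2)) (pvCell board p.2 p.1)))
          (List.replicate (R + C - 1) [], List.replicate (R + C - 1) []) := by
      rw [pvPairs, pv_foldl_flatMap]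
      congr 1
      funext st2 i
      rw [List.foldl_map]
      congr 1
    rw [h1, pv_foldl_prod (fun s (p : Nat × Nat) => pvPush s (p.1 + p.2) (pvCell board p.2 p.1))
        (fun s (p : Nat × Nat) => pvPush s (p.1 + (R - 1 - p.2)) (pvCell board p.2 p.1))]
    rw [pv_buckets_eq board (fun p => p.1 + p.2) C R (R + C - 1),
        pv_buckets_eq board (fun p => p.1 + (R - 1 - p.2)) C R (R + C - 1)]
    rw [show R + C - 1 = C + R - 1 by omega]
  -- B's nested loop as a pair of sweep folds over the flat pair list
  have hnestB : (List.range C).foldl (fun st (i : Nat) =>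
      (List.range R).foldl (fun (st : (List Int × List Int) × (List Int × List Int)) (j : Nat) =>
        let cell := (PySem.List.pyGet? ((PySem.List.pyGet? board (j : Int)).getD []) (i : Int)).getD []
        cell.foldl (fun st e =>
          (pvUpd player (i + j) st.1 e, pvUpd player (i + (R - 1 - j)) st.2 e)) st) st)
      ((List.replicate (C + R - 1) 0, List.replicate (C + R - 1) 0),
       (List.replicate (C + R - 1) 0, List.replicate (C + R - 1) 0))
      = ((pvPairs C R).foldl (fun S p => (pvCell board p.2 p.1).foldl
            (pvUpd player (p.1 + p.2)) S)
          (List.replicate (C + R - 1) 0, List.replicate (C + R - 1) 0),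
         (pvPairs C R).foldl (fun S p => (pvCell board p.2 p.1).foldl
            (pvUpd player (p.1 + (R - 1 - p.2))) S)
          (List.replicate (C + R - 1) 0, List.replicate (C + R - 1) 0)) := by
    have h1 : (List.range C).foldl (fun st (i : Nat) =>
        (List.range R).foldl (fun (st : (List Int × List Int) × (List Int × List Int)) (j : Nat) =>
          let cell := (PySem.List.pyGet? ((PySem.List.pyGet? board (j : Int)).getD []) (i : Int)).getD []
          cell.foldl (fun st e =>
            (pvUpd player (i + j) st.1 e, pvUpd player (i + (R - 1 - j)) st.2 e)) st) st)
        ((List.replicate (C + R - 1) 0, List.replicate (C + R - 1) 0),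
         (List.replicate (C + R - 1) 0, List.replicate (C + R - 1) 0))
        = (pvPairs C R).foldl (fun st (p : Nat × Nat) =>
            (pvCell board p.2 p.1).foldl (fun st e =>
              (pvUpd player (p.1 + p.2) st.1 e, pvUpd player (p.1 + (R - 1 - p.2)) st.2 e)) st)
          ((List.replicate (C + R - 1) 0, List.replicate (C + R - 1) 0),
           (List.replicate (C + R - 1) 0, List.replicate (C + R - 1) 0)) := by
      rw [pvPairs, pv_foldl_flatMap]
      congr 1
      funext st i
      rw [List.foldl_map]
      congr 1
    rw [h1]
    have h2 : (fun (st : (List Int × List Int) × (List Int × List Int)) (p : Nat × Nat) =>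
        (pvCell board p.2 p.1).foldl (fun st e =>
          (pvUpd player (p.1 + p.2) st.1 e, pvUpd player (p.1 + (R - 1 - p.2)) st.2 e)) st)
        = (fun st p =>
          ((pvCell board p.2 p.1).foldl (pvUpd player (p.1 + p.2)) st.1,
           (pvCell board p.2 p.1).foldl (pvUpd player (p.1 + (R - 1 - p.2))) st.2)) := by
      funext st p
      exact pv_foldl_prod (pvUpd player (p.1 + p.2)) (pvUpd player (p.1 + (R - 1 - p.2)))
        (pvCell board p.2 p.1) st
    rw [h2]
    exact pv_foldl_prod
      (fun (S : List Int × List Int) (p : Nat × Nat) =>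
        (pvCell board p.2 p.1).foldl (pvUpd player (p.1 + p.2)) S)
      (fun (S : List Int × List Int) (p : Nat × Nat) =>
        (pvCell board p.2 p.1).foldl (pvUpd player (p.1 + (R - 1 - p.2))) S)
      (pvPairs C R) _
  rw [hnestA]
  simp only
  rw [hnestB]
  simp only
  rw [pv_best_eq board player (fun p => p.1 + p.2) C R (C + R - 1) (pv_keys1 C R),
      pv_best_eq board player (fun p => p.1 + (R - 1 - p.2)) C R (C + R - 1) (pv_keys2 C R)]
  rw [pv_process_eq, pv_process_eq]
  simp only [List.map_map, Function.comp_def]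
  have hf1 := pv_filter_pred ((List.range (C + R - 1)).map
    (fun k => pvCellsA board (fun p => p.1 + p.2) C R k)) player
  have hf2 := pv_filter_pred ((List.range (C + R - 1)).map
    (fun k => pvCellsA board (fun p => p.1 + (R - 1 - p.2)) C R k)) player
  simp only [List.map_map, Function.comp_def] at hf1 hf2
  rw [hf1, hf2, pv_max_bridge, pv_max_bridge]

-- ===== VERDICT (by name: the statement is the Claim_ definition above) =====
theorem check_diagonal_spec : Claim_equal_check_diagonal := by
  intro board player _ _
  exact pv_main board player
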